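-- pv_equiv track=rewrite | github.com/kaestro/algorithm-study | February/7th/ball_in_berland.py | ball_in_berland
-- ===== SOURCE A (Python) =====
-- from collections import defaultdict
--
-- def ball_in_berland(lst1, lst2, k):
--     d1 = defaultdict(list)
--     d2 = defaultdict(list)
--
--     for i in range(k):
--         d1[lst1[i]].append(lst2[i])
--         d2[lst2[i]].append(lst1[i])
--
--     result = 0
--     for key, value in d1.items():
--         for n in value:
--             temp = k + 1
--             temp -= len(value)
--             temp -= len(d2[n])
--             result += temp
--
--     return result // 2
-- ===== SOURCE B (Python) =====
-- from collections import Counter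
--
-- def ball_in_berland(lst1, lst2, k):
--     couples = [(lst1[i], lst2[i]) for i in range(k)]
--     deg1 = Counter(b for b, _ in couples)
--     deg2 = Counter(g for _, g in couples)
--     m = len(couples)
--     total = m * (m - 1) // 2
--     for d in deg1.values():
--         total -= d * (d - 1) // 2
--     for d in deg2.values():
--         total -= d * (d - 1) // 2
--     return total
-- ===== Notes on version B (the rewrite author's own statement) =====
-- stated objective: simpler
-- what changed: Replaces A's two adjacency-list dicts and nested per-edge loop summing k+1-deg-deg (then //2) with degree Counters and the closed form C(k,2) minus the sum of C(deg,2) over boys and over girls.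
import Mathlib
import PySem

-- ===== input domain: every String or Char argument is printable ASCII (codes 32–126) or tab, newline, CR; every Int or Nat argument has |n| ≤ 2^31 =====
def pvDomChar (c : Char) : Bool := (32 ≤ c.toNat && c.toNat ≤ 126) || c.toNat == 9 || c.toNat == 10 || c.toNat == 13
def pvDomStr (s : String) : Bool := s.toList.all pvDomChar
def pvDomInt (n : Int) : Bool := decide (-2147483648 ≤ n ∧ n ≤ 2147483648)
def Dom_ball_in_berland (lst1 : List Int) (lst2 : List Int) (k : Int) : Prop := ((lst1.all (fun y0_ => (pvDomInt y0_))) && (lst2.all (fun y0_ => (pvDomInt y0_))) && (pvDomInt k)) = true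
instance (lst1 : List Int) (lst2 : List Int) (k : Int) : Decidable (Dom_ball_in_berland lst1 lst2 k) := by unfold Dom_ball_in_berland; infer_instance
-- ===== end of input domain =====

-- B replaces A's adjacency-list dicts and nested per-edge loop by degree counters and
-- the closed form C(k,2) - sum C(deg_boy,2) - sum C(deg_girl,2); objective: simpler.


-- ===== PORT A =====
def ball_in_berland (lst1 : List Int) (lst2 : List Int) (k : Int) : Int :=
  let dd :=
    (PySem.List.pyRange 0 k 1).foldl
      (fun (p : PySem.Dict Int (List Int) × PySem.Dict Int (List Int)) i =>
        (p.1.modify (PySem.List.pyGetD lst1 i 0) [] (fun v => v ++ [PySem.List.pyGetD lst2 i 0]),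
         p.2.modify (PySem.List.pyGetD lst2 i 0) [] (fun v => v ++ [PySem.List.pyGetD lst1 i 0])))
      (PySem.Dict.empty, PySem.Dict.empty)
  let result :=
    dd.1.items.foldl
      (fun result kv =>
        kv.2.foldl
          (fun result n =>
            result + (k + 1 - PySem.List.len kv.2 - PySem.List.len (dd.2.getD n [])))
          result)
      0
  PySem.Int.floordiv result 2

-- ===== PORT B =====
def ball_in_berland_alt (lst1 : List Int) (lst2 : List Int) (k : Int) : Int :=
  let couples := (PySem.List.pyRange 0 k 1).map
      (fun i => (PySem.List.pyGetD lst1 i 0, PySem.List.pyGetD lst2 i 0))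
  let deg1 := PySem.Dict.counter (couples.map (fun p => p.1))
  let deg2 := PySem.Dict.counter (couples.map (fun p => p.2))
  let m := PySem.List.len couples
  let total := PySem.Int.floordiv (m * (m - 1)) 2
  let total := deg1.values.foldl (fun t d => t - PySem.Int.floordiv (d * (d - 1)) 2) total
  deg2.values.foldl (fun t d => t - PySem.Int.floordiv (d * (d - 1)) 2) total

-- ===== PRECONDITION & SPEC =====
-- Pre_: exactly the inputs on which A returns: lst1[i] and lst2[i] must succeed for every
-- i in range(k), i.e. k ≤ len(lst1) and k ≤ len(lst2); otherwise A raises IndexError.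
def Pre_ball_in_berland (lst1 : List Int) (lst2 : List Int) (k : Int) : Prop :=
  k ≤ (lst1.length : Int) ∧ k ≤ (lst2.length : Int)
instance (lst1 : List Int) (lst2 : List Int) (k : Int) : Decidable (Pre_ball_in_berland lst1 lst2 k) := by unfold Pre_ball_in_berland; infer_instance
def pvWitness_ball_in_berland : List Int × List Int × Int := ([1, 1, 2], [3, 4, 4], 3)

def Spec_ball_in_berland (lst1 : List Int) (lst2 : List Int) (k : Int) (out : Int) : Prop := out = ball_in_berland_alt lst1 lst2 k
instance (lst1 : List Int) (lst2 : List Int) (k : Int) (out : Int) : Decidable (Spec_ball_in_berland lst1 lst2 k out) := by unfold Spec_ball_in_berland; infer_instance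

-- ===== CLAIM (what is proved, stated in full; the proofs are below) =====
def Claim_equal_ball_in_berland : Prop := ∀ (lst1 : List Int) (lst2 : List Int) (k : Int), Dom_ball_in_berland lst1 lst2 k → Pre_ball_in_berland lst1 lst2 k → Spec_ball_in_berland lst1 lst2 k (ball_in_berland lst1 lst2 k)

-- ===== LEMMAS AND PROOFS =====

-- the edge list both programs traverse: the first k couples
def pvEdges (lst1 lst2 : List Int) (k : Int) : List (Int × Int) :=
  (lst1.take k.toNat).zip (lst2.take k.toNat)

lemma pv_range_nil (k : Int) (hk : k ≤ 0) : PySem.List.pyRange 0 k 1 = [] := by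
  simp [PySem.List.pyRange]; omega

lemma pv_edges_length (lst1 lst2 : List Int) (k : Int) (hk : 0 ≤ k)
    (h1 : k ≤ (lst1.length : Int)) (h2 : k ≤ (lst2.length : Int)) :
    (pvEdges lst1 lst2 k).length = k.toNat := by
  simp [pvEdges]; omega

-- the index loop over range(k) reads off exactly the edge list
lemma pv_range_map_edges (lst1 lst2 : List Int) (k : Int) (hk : 0 ≤ k)
    (h1 : k ≤ (lst1.length : Int)) (h2 : k ≤ (lst2.length : Int)) :
    (PySem.List.pyRange 0 k 1).map
        (fun i => (PySem.List.pyGetD lst1 i 0, PySem.List.pyGetD lst2 i 0))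
      = pvEdges lst1 lst2 k := by
  have hk' : k = ((k.toNat : Nat) : Int) := by omega
  rw [hk', PySem.List.pyRange_zero_natCast, List.map_map]
  apply List.ext_getElem
  · simp [pvEdges]; omega
  · intro j hj1 hj2
    simp only [List.getElem_map, List.getElem_range, Function.comp_apply]
    have hj : j < k.toNat := by simpa using hj1
    simp only [pvEdges, List.getElem_zip, PySem.List.pyGetD_natCast]
    rw [List.getElem_take, List.getElem_take]
    rw [List.getD_eq_getElem lst1 0 (by omega), List.getD_eq_getElem lst2 0 (by omega)]

lemma pv_foldl_edges {σ : Type} (lst1 lst2 : List Int) (k : Int) (hk : 0 ≤ k)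
    (h1 : k ≤ (lst1.length : Int)) (h2 : k ≤ (lst2.length : Int))
    (step : σ → Int → Int → σ) (init : σ) :
    (PySem.List.pyRange 0 k 1).foldl
        (fun p i => step p (PySem.List.pyGetD lst1 i 0) (PySem.List.pyGetD lst2 i 0)) init
      = (pvEdges lst1 lst2 k).foldl (fun p q => step p q.1 q.2) init := by
  rw [← pv_range_map_edges lst1 lst2 k hk h1 h2, List.foldl_map]

lemma pv_sum_ite_zero {κ : Type} [BEq κ] [LawfulBEq κ] (s : List κ) (a : κ) (v : Int)
    (ha : a ∉ s) :
    (s.map (fun c => if a == c then v else 0)).sum = 0 := by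
  induction s with
  | nil => simp
  | cons c t ih =>
    have hac : ¬ (a == c) = true := by
      simp only [beq_iff_eq]; rintro rfl; exact ha (List.mem_cons_self)
    simp only [List.map_cons, List.sum_cons, if_neg hac]
    rw [ih (fun h => ha (List.mem_cons_of_mem _ h))]
    ring

lemma pv_sum_ite_single {κ : Type} [BEq κ] [LawfulBEq κ] (s : List κ) (a : κ) (v : Int)
    (hnd : s.Nodup) (ha : a ∈ s) :
    (s.map (fun c => if a == c then v else 0)).sum = v := by
  induction s with
  | nil => simp at ha
  | cons c t ih =>
    rcases List.mem_cons.mp ha with rfl | hat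
    · simp only [List.map_cons, List.sum_cons, if_pos (beq_self_eq_true a)]
      rw [pv_sum_ite_zero t a v (List.nodup_cons.mp hnd).1]
      ring
    · have hac : ¬ (a == c) = true := by
        simp only [beq_iff_eq]; rintro rfl; exact (List.nodup_cons.mp hnd).1 hat
      simp only [List.map_cons, List.sum_cons, if_neg hac]
      rw [ih (List.nodup_cons.mp hnd).2 hat]
      ring

-- summing group by group is summing over the whole list (the groups partition l by key)
lemma pv_sum_partition {α κ : Type} [BEq κ] [LawfulBEq κ] (l : List α) (key : α → κ) (F : α → Int) :
    ((PySem.Set.ofList (l.map key)).map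
        (fun c => ((l.filter (fun x => key x == c)).map F).sum)).sum
      = (l.map F).sum := by
  induction l using List.reverseRecOn with
  | nil => simp
  | append_singleton t a ih =>
    rw [List.map_append, List.map_singleton, PySem.Set.ofList_append_singleton]
    have hfil : ∀ c, (t ++ [a]).filter (fun x => key x == c)
        = t.filter (fun x => key x == c) ++ if (key a == c) = true then [a] else [] := by
      intro c; rw [List.filter_append]; congr 1; simp [List.filter]; split <;> simp_all
    by_cases hmem : key a ∈ PySem.Set.ofList (t.map key)
    · rw [PySem.Set.add_of_mem hmem]
      have hcongr : ((PySem.Set.ofList (t.map key)).map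
            (fun c => (((t ++ [a]).filter (fun x => key x == c)).map F).sum)).sum
          = ((PySem.Set.ofList (t.map key)).map
            (fun c => ((t.filter (fun x => key x == c)).map F).sum
              + (if key a == c then F a else 0))).sum := by
        apply congrArg
        apply List.map_congr_left
        intro c _
        rw [hfil c, List.map_append, List.sum_append]
        congr 1
        split <;> simp
      rw [hcongr, PySem.List.sum_map_add_int, ih,
        pv_sum_ite_single _ _ _ (PySem.Set.nodup_ofList _) hmem]
      simp
    · rw [PySem.Set.add_of_not_mem hmem, List.map_append, List.sum_append]
      have hka : key a ∉ t.map key := fun h => hmem ((PySem.Set.mem_ofList _ _).mpr h)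
      have hcongr : ((PySem.Set.ofList (t.map key)).map
            (fun c => (((t ++ [a]).filter (fun x => key x == c)).map F).sum)).sum
          = ((PySem.Set.ofList (t.map key)).map
            (fun c => ((t.filter (fun x => key x == c)).map F).sum)).sum := by
        apply congrArg
        apply List.map_congr_left
        intro c hc
        rw [hfil c]
        have : ¬ (key a == c) = true := by
          simp only [beq_iff_eq]; rintro rfl
          exact hmem hc
        rw [if_neg this, List.append_nil]
      rw [hcongr, ih]
      have hta : t.filter (fun x => key x == key a) = [] := by
        rw [List.filter_eq_nil_iff]
        intro x hx hbx
        exact hka (List.mem_map.mpr ⟨x, hx, by simpa using hbx⟩)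
      rw [List.map_singleton, List.sum_cons, List.sum_nil, hfil (key a), hta,
        if_pos (beq_self_eq_true (key a)), List.nil_append, List.map_singleton,
        List.sum_cons, List.sum_nil, List.map_append, List.sum_append,
        List.map_singleton, List.sum_cons, List.sum_nil]
      ring

lemma pv_filter_length_count {α κ : Type} [BEq κ] [LawfulBEq κ] (l : List α) (key : α → κ) (c : κ) :
    (l.filter (fun x => key x == c)).length = (l.map key).count c := by
  rw [List.count, List.countP_map, ← List.countP_eq_length_filter]
  rfl

lemma pv_foldl_sub {α : Type} (l : List α) (g : α → Int) (a : Int) :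
    l.foldl (fun t d => t - g d) a = a - (l.map g).sum := by
  induction l generalizing a with
  | nil => simp
  | cons x t ih => simp [ih]; ring

lemma pv_two_mul_floordiv (d : Int) : 2 * PySem.Int.floordiv (d * (d - 1)) 2 = d * (d - 1) := by
  rw [PySem.Int.floordiv_eq_ediv_of_pos (by norm_num)]
  exact Int.mul_ediv_cancel' (Int.even_mul_pred_self d).two_dvd

lemma pv_two_mul_sum_q (vals : List Int) :
    2 * (vals.map (fun d => PySem.Int.floordiv (d * (d - 1)) 2)).sum
      = (vals.map (fun d => d * d)).sum - vals.sum := by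
  induction vals with
  | nil => simp
  | cons x t ih =>
    simp only [List.map_cons, List.sum_cons]
    have := pv_two_mul_floordiv x
    ring_nf
    ring_nf at ih this
    omega

lemma pv_counter_values (l : List Int) :
    (PySem.Dict.counter l).values = (PySem.Set.ofList l).map (fun c => (l.count c : Int)) := by
  rw [PySem.Dict.values_eq_map_keys _ (PySem.Dict.nodup_keys_counter l) 0]
  rw [PySem.Dict.keys_counter]
  apply List.map_congr_left
  intro c _
  exact PySem.Dict.getD_counter l c

lemma pv_sum_counts (l : List Int) :
    ((PySem.Set.ofList l).map (fun c => (l.count c : Int))).sum = (l.length : Int) := by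
  have h := pv_sum_partition l (fun x => x) (fun _ => (1 : Int))
  rw [List.map_id'] at h
  calc ((PySem.Set.ofList l).map (fun c => (l.count c : Int))).sum
      = ((PySem.Set.ofList l).map
          (fun c => ((l.filter (fun x => x == c)).map (fun _ => (1 : Int))).sum)).sum := by
        apply congrArg; apply List.map_congr_left; intro c _
        rw [PySem.List.sum_map_const_int]
        have hc := pv_filter_length_count l (fun x => x) c
        rw [List.map_id'] at hc
        rw [hc]; ring
    _ = (l.map (fun _ => (1 : Int))).sum := h
    _ = (l.length : Int) := by rw [PySem.List.sum_map_const_int]; ring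

lemma pv_sum_counts_sq (l : List Int) :
    ((PySem.Set.ofList l).map (fun c => (l.count c : Int) * (l.count c : Int))).sum
      = (l.map (fun b => (l.count b : Int))).sum := by
  have h := pv_sum_partition l (fun x => x) (fun b => (l.count b : Int))
  rw [List.map_id'] at h
  rw [← h]
  apply congrArg; apply List.map_congr_left; intro c _
  have hmc : (l.filter (fun x => x == c)).map (fun b => (l.count b : Int))
      = (l.filter (fun x => x == c)).map (fun _ => (l.count c : Int)) := by
    apply List.map_congr_left; intro x hx
    have : x = c := by simpa using (List.mem_filter.mp hx).2
    rw [this]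
  rw [hmc, PySem.List.sum_map_const_int]
  have hc := pv_filter_length_count l (fun x => x) c
  rw [List.map_id'] at hc
  rw [hc]

lemma pv_sum_three (es : List (Int × Int)) (c : Int) (f g : Int × Int → Int) :
    (es.map (fun p => c - f p - g p)).sum
      = (es.length : Int) * c - (es.map f).sum - (es.map g).sum := by
  induction es with
  | nil => simp
  | cons x t ih =>
    simp only [List.map_cons, List.sum_cons, List.length_cons, ih]
    push_cast
    ring

lemma pv_floordiv_two_mul (r : Int) : PySem.Int.floordiv (2 * r) 2 = r := by
  rw [PySem.Int.floordiv_eq_ediv_of_pos (by norm_num)]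
  exact Int.mul_ediv_cancel_left r (by norm_num)

-- A's accumulated result, characterised as a sum of per-edge terms
lemma pv_A_sum (es : List (Int × Int)) (k : Int) :
    ((es.foldl (fun d q => d.modify q.1 [] (fun v => v ++ [q.2]))
        (PySem.Dict.empty : PySem.Dict Int (List Int))).items.foldl
      (fun result kv =>
        kv.2.foldl
          (fun result n =>
            result + (k + 1 - PySem.List.len kv.2 -
              PySem.List.len ((es.foldl (fun d q => d.modify q.2 [] (fun v => v ++ [q.1]))
                (PySem.Dict.empty : PySem.Dict Int (List Int))).getD n [])))
          result)
      0)
    = (es.map (fun p => k + 1 - ((es.map (fun q => q.1)).count p.1 : Int)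
        - ((es.map (fun q => q.2)).count p.2 : Int))).sum := by
  have hnd : (es.foldl (fun d q => d.modify q.1 [] (fun v => v ++ [q.2]))
      (PySem.Dict.empty : PySem.Dict Int (List Int))).keys.Nodup :=
    PySem.Dict.nodup_keys_foldl_modify_key es (fun q => q.1) [] (fun _ q v => v ++ [q.2])
      PySem.Dict.empty (by simp)
  have hkeys : (es.foldl (fun d q => d.modify q.1 [] (fun v => v ++ [q.2]))
      (PySem.Dict.empty : PySem.Dict Int (List Int))).keys
      = PySem.Set.ofList (es.map (fun q => q.1)) := by
    rw [PySem.Dict.keys_foldl_modify_key es (fun q => q.1) [] (fun _ q v => v ++ [q.2])]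
    rw [PySem.Dict.keys_empty, PySem.Set.update_nil_left]
  have hgrp : ∀ c, (es.foldl (fun d q => d.modify q.1 [] (fun v => v ++ [q.2]))
      (PySem.Dict.empty : PySem.Dict Int (List Int))).getD c []
      = (es.filter (fun p => p.1 == c)).map (fun p => p.2) := by
    intro c
    rw [PySem.Dict.getD_foldl_modify_append es PySem.Dict.empty c, PySem.Dict.getD_empty,
      List.nil_append]
  have hd2 : ∀ n, ((es.foldl (fun d q => d.modify q.2 [] (fun v => v ++ [q.1]))
      (PySem.Dict.empty : PySem.Dict Int (List Int))).getD n []).length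
      = (es.map (fun q => q.2)).count n := by
    intro n
    have hsw : es.foldl (fun d q => d.modify q.2 [] (fun v => v ++ [q.1]))
        (PySem.Dict.empty : PySem.Dict Int (List Int))
        = (es.map (fun q => (q.2, q.1))).foldl (fun d p => d.modify p.1 [] (fun v => v ++ [p.2]))
          PySem.Dict.empty := by
      rw [List.foldl_map]
    rw [hsw, PySem.Dict.getD_foldl_modify_append, PySem.Dict.getD_empty, List.nil_append,
      List.length_map, pv_filter_length_count (es.map (fun q => (q.2, q.1))) (fun p => p.1) n,
      List.map_map]
    rfl
  rw [PySem.Dict.items_eq_map_keys _ hnd [], hkeys]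
  simp only [PySem.List.foldl_add, PySem.List.len_eq]
  rw [List.map_map]
  have hcongr : (PySem.Set.ofList (es.map (fun q => q.1))).map
        ((fun kv : Int × List Int => (kv.2.map (fun n => k + 1 - (kv.2.length : Int) -
          (((es.foldl (fun d q => d.modify q.2 [] (fun v => v ++ [q.1]))
            (PySem.Dict.empty : PySem.Dict Int (List Int))).getD n []).length : Int))).sum) ∘
          (fun c => (c, (es.foldl (fun d q => d.modify q.1 [] (fun v => v ++ [q.2]))
            (PySem.Dict.empty : PySem.Dict Int (List Int))).getD c [])))
      = (PySem.Set.ofList (es.map (fun q => q.1))).map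
        (fun c => ((es.filter (fun p => p.1 == c)).map
          (fun p => k + 1 - ((es.map (fun q => q.1)).count p.1 : Int)
            - ((es.map (fun q => q.2)).count p.2 : Int))).sum) := by
    apply List.map_congr_left
    intro c _
    simp only [Function.comp_apply, hgrp c, List.map_map, List.length_map]
    apply congrArg
    apply List.map_congr_left
    intro p hp
    have hpc : p.1 = c := by simpa using (List.mem_filter.mp hp).2
    simp only [Function.comp_apply, hd2 p.2, hpc,
      pv_filter_length_count es (fun p : Int × Int => p.1) c]
  rw [hcongr, pv_sum_partition es (fun p => p.1)
    (fun p => k + 1 - ((es.map (fun q => q.1)).count p.1 : Int)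
      - ((es.map (fun q => q.2)).count p.2 : Int))]
  ring

-- the closed form: A's sum, floor-divided by 2, is exactly B's value
lemma pv_final (es : List (Int × Int)) (k : Int) (hlen : (es.length : Int) = k) :
    PySem.Int.floordiv
        ((es.map (fun p => k + 1 - ((es.map (fun q => q.1)).count p.1 : Int)
          - ((es.map (fun q => q.2)).count p.2 : Int))).sum) 2
      = (PySem.Dict.counter (es.map (fun p => p.2))).values.foldl
          (fun t d => t - PySem.Int.floordiv (d * (d - 1)) 2)
          ((PySem.Dict.counter (es.map (fun p => p.1))).values.foldl
            (fun t d => t - PySem.Int.floordiv (d * (d - 1)) 2)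
            (PySem.Int.floordiv (k * (k - 1)) 2)) := by
  rw [pv_counter_values, pv_counter_values, pv_foldl_sub, pv_foldl_sub]
  rw [pv_sum_three es (k + 1)
    (fun p => ((es.map (fun q => q.1)).count p.1 : Int))
    (fun p => ((es.map (fun q => q.2)).count p.2 : Int))]
  have hTb : (es.map (fun p => ((es.map (fun q => q.1)).count p.1 : Int))).sum
      = ((es.map (fun q => q.1)).map (fun b => ((es.map (fun q => q.1)).count b : Int))).sum := by
    rw [List.map_map]; rfl
  have hTg : (es.map (fun p => ((es.map (fun q => q.2)).count p.2 : Int))).sum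
      = ((es.map (fun q => q.2)).map (fun b => ((es.map (fun q => q.2)).count b : Int))).sum := by
    rw [List.map_map]; rfl
  have key : ∀ l : List Int, l.length = es.length →
      2 * (((PySem.Set.ofList l).map (fun c => (l.count c : Int))).map
        (fun d => PySem.Int.floordiv (d * (d - 1)) 2)).sum
      = (l.map (fun b => (l.count b : Int))).sum - k := by
    intro l hl
    rw [pv_two_mul_sum_q, List.map_map, pv_sum_counts]
    have : ((PySem.Set.ofList l).map ((fun d => d * d) ∘ (fun c => (l.count c : Int)))).sum
        = ((PySem.Set.ofList l).map (fun c => (l.count c : Int) * (l.count c : Int))).sum := rfl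
    rw [this, pv_sum_counts_sq, hl, hlen]
  have hb := key (es.map (fun q => q.1)) (List.length_map _)
  have hg := key (es.map (fun q => q.2)) (List.length_map _)
  have h2 := pv_two_mul_floordiv k
  rw [hTb, hTg]
  set Sb := (((PySem.Set.ofList (es.map (fun q => q.1))).map
    (fun c => (((es.map (fun q => q.1)).count c : Int)))).map
    (fun d => PySem.Int.floordiv (d * (d - 1)) 2)).sum with hSb
  set Sg := (((PySem.Set.ofList (es.map (fun q => q.2))).map
    (fun c => (((es.map (fun q => q.2)).count c : Int)))).map
    (fun d => PySem.Int.floordiv (d * (d - 1)) 2)).sum with hSg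
  have hS : (es.length : Int) * (k + 1)
      - ((es.map (fun q => q.1)).map (fun b => ((es.map (fun q => q.1)).count b : Int))).sum
      - ((es.map (fun q => q.2)).map (fun b => ((es.map (fun q => q.2)).count b : Int))).sum
      = 2 * (PySem.Int.floordiv (k * (k - 1)) 2 - Sb - Sg) := by
    have hring : k * (k + 1) = k * (k - 1) + 2 * k := by ring
    rw [hlen]
    linarith [h2, hb, hg, hring]
  rw [hS, pv_floordiv_two_mul]

-- ===== VERDICT (by name: the statement is the Claim_ definition above) =====
theorem ball_in_berland_spec : Claim_equal_ball_in_berland := by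
  intro lst1 lst2 k _ hpre
  obtain ⟨h1, h2⟩ := hpre
  unfold Spec_ball_in_berland ball_in_berland ball_in_berland_alt
  by_cases hk : 0 ≤ k
  · simp only []
    rw [PySem.List.foldl_prod_mk
      (f := fun d i => PySem.Dict.modify d (PySem.List.pyGetD lst1 i 0) []
        (fun v => v ++ [PySem.List.pyGetD lst2 i 0]))
      (g := fun d i => PySem.Dict.modify d (PySem.List.pyGetD lst2 i 0) []
        (fun v => v ++ [PySem.List.pyGetD lst1 i 0]))]
    rw [pv_foldl_edges lst1 lst2 k hk h1 h2
      (fun d a b => PySem.Dict.modify d a [] (fun v => v ++ [b])) PySem.Dict.empty]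
    rw [pv_foldl_edges lst1 lst2 k hk h1 h2
      (fun d a b => PySem.Dict.modify d b [] (fun v => v ++ [a])) PySem.Dict.empty]
    rw [pv_range_map_edges lst1 lst2 k hk h1 h2]
    rw [pv_A_sum (pvEdges lst1 lst2 k) k]
    have hlen : ((pvEdges lst1 lst2 k).length : Int) = k := by
      rw [pv_edges_length lst1 lst2 k hk h1 h2]; omega
    have hm : PySem.List.len (pvEdges lst1 lst2 k) = k := by
      rw [PySem.List.len_eq, hlen]
    rw [hm]
    exact pv_final (pvEdges lst1 lst2 k) k hlen
  · rw [pv_range_nil k (by omega)]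
    simp [PySem.List.len_eq, PySem.Dict.counter]
    rfl
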